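-- pv_equiv track=rewrite | github.com/Kaiolohia/Encryption | EncryptDecryptV4_B.py | from_number
-- ===== SOURCE A (Python) =====
-- def from_number(msg):
--   nums = []
--   chunk = ''
--   for i in range(1, len(msg) + 1):
--     if i%3 == 0:
--       chunk += msg[i-1]
--       nums.append(str(chr(int(chunk))))
--       chunk = ''
--     else:
--       chunk += msg[i-1]
--   return nums
-- ===== SOURCE B (Python) =====
-- def from_number(msg):
--   end = (len(msg) // 3) * 3
--   return [str(chr(int(msg[i:i+3]))) for i in range(0, end, 3)]
-- ===== Notes on version B (the rewrite author's own statement) =====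
-- stated objective: simpler
-- what changed: Replaced the char-by-char loop with a modulo counter and a concatenation buffer by a single comprehension over stride-3 slices, truncating at (len//3)*3 so trailing incomplete chunks are dropped exactly as A drops them.
import Mathlib
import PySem

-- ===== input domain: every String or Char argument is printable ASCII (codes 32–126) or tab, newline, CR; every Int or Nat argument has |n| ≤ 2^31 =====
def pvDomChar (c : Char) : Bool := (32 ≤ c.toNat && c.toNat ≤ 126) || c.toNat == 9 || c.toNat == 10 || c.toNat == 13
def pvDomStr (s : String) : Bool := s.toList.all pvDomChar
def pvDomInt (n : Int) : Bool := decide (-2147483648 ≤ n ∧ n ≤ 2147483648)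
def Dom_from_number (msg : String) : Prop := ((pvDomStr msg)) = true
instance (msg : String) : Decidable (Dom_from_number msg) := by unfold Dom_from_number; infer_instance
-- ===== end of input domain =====

-- B replaces A's modulo counter and concatenation buffer by a comprehension over stride-3
-- slices (objective: simpler); equal on every input A decodes without raising (see Pre_).

-- str(chr(n)) for an Int code point; exact for the values Pre_ admits (0 ≤ n ≤ 999,
-- since a chunk is 3 printable chars).  Shared by both ports (Python's builtin chr).
def pvChr (n : Int) : String := String.ofList [Char.ofNat n.toNat]

-- ===== PORT A =====
def from_number (msg : String) : List String :=
  let l := msg.toList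
  -- nums = [], chunk = ''; for i in range(1, len(msg)+1): …
  ((PySem.List.pyRange 1 ((l.length : Int) + 1) 1).foldl
    (fun (st : List String × List Char) i =>
      if PySem.Int.mod i 3 = 0 then
        -- chunk += msg[i-1]; nums.append(str(chr(int(chunk)))); chunk = ''
        let chunk := st.2 ++ (PySem.List.pyGet? l (i - 1)).elim [] (fun c => [c])
        (st.1 ++ [pvChr ((PySem.Int.ofChars? chunk).getD 0)], ([] : List Char))
      else
        -- chunk += msg[i-1]
        (st.1, st.2 ++ (PySem.List.pyGet? l (i - 1)).elim [] (fun c => [c])))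
    ([], [])).1

-- ===== PORT B =====
def from_number_alt (msg : String) : List String :=
  let l := msg.toList
  let e : Int := (PySem.Int.floordiv (l.length : Int) 3) * 3
  (PySem.List.pyRange 0 e 3).map (fun i =>
    pvChr ((PySem.Int.ofChars? (PySem.List.slice l (some i) (some (i + 3)))).getD 0))

-- ===== PRECONDITION & SPEC =====
-- Pre_ excludes exactly the inputs where A raises: a full 3-char chunk that int() cannot
-- parse (ValueError) or that parses negative, on which chr() raises (ValueError).
def Pre_from_number (msg : String) : Prop :=
  ∀ k ∈ List.range (msg.toList.length / 3),
    0 ≤ (PySem.Int.ofChars? ((msg.toList.drop (3 * k)).take 3)).getD (-1)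
instance (msg : String) : Decidable (Pre_from_number msg) := by
  unfold Pre_from_number; infer_instance
def pvWitness_from_number : String := "072105"
def Spec_from_number (msg : String) (out : List String) : Prop := out = from_number_alt msg
instance (msg : String) (out : List String) : Decidable (Spec_from_number msg out) := by unfold Spec_from_number; infer_instance

-- ===== CLAIM (what is proved, stated in full; the proofs are below) =====
def Claim_equal_from_number : Prop := ∀ (msg : String), Dom_from_number msg → Pre_from_number msg → Spec_from_number msg (from_number msg)

-- ===== LEMMAS AND PROOFS =====

-- The common chunk decoder: decode successive full 3-char chunks, drop the remainder.
def pvChunks : List Char → List String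
  | a :: b :: c :: t => pvChr ((PySem.Int.ofChars? [a, b, c]).getD 0) :: pvChunks t
  | _ => []

theorem pvChunks_short {l : List Char} (h : l.length < 3) : pvChunks l = [] := by
  match l, h with
  | [], _ => rfl
  | [_], _ => rfl
  | [_, _], _ => rfl

-- A's loop body, named for the proofs.
def pvStepA (l : List Char) (st : List String × List Char) (i : Int) : List String × List Char :=
  if PySem.Int.mod i 3 = 0 then
    let chunk := st.2 ++ (PySem.List.pyGet? l (i - 1)).elim [] (fun c => [c])
    (st.1 ++ [pvChr ((PySem.Int.ofChars? chunk).getD 0)], ([] : List Char))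
  else
    (st.1, st.2 ++ (PySem.List.pyGet? l (i - 1)).elim [] (fun c => [c]))

theorem pvStepA_mod_ne (l : List Char) (st : List String × List Char) (i : Int)
    (h : PySem.Int.mod i 3 ≠ 0) :
    pvStepA l st i = (st.1, st.2 ++ (PySem.List.pyGet? l (i - 1)).elim [] (fun c => [c])) := by
  simp only [pvStepA, if_neg h]

theorem pvRange3_cons (a b : Int) (h : a < b) :
    PySem.List.pyRange a b 3 = a :: PySem.List.pyRange (a + 3) b 3 := by
  rw [PySem.List.pyRange_of_pos a b (by norm_num), PySem.List.pyRange_of_pos (a + 3) b (by norm_num)]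
  by_cases h2 : a + 3 < b
  · rw [if_pos h, if_pos h2]
    have hc : ((b - a + 3 - 1) / 3).toNat = ((b - (a + 3) + 3 - 1) / 3).toNat + 1 := by omega
    rw [hc, List.range_succ_eq_map, List.map_cons, List.map_map]
    refine congrArg₂ _ (by norm_num) (List.map_congr_left ?_)
    intro x _
    simp [Function.comp]
    ring
  · rw [if_pos h, if_neg h2]
    have hc : ((b - a + 3 - 1) / 3).toNat = 1 := by omega
    rw [hc]
    simp

theorem pvFoldA_fst (l : List Char) (is : List Int) (h : ∀ i ∈ is, PySem.Int.mod i 3 ≠ 0) :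
    ∀ (acc : List String) (cs : List Char), ((is.foldl (pvStepA l) (acc, cs)).1 = acc) := by
  induction is with
  | nil => intro acc cs; simp
  | cons i is ih =>
    intro acc cs
    rw [List.foldl_cons, pvStepA_mod_ne l _ i (h i (by simp))]
    exact ih (fun j hj => h j (by simp [hj])) acc _

-- A's loop from index 3*k+1 with an empty buffer produces acc ++ pvChunks (l.drop (3*k)).
theorem pvLoopA (l : List Char) (m : Nat) :
    ∀ (k : Nat) (acc : List String),
      3 * k + 3 * m ≤ l.length → l.length - 3 * k - 3 * m < 3 →
      ((PySem.List.pyRange (((3 * k : Nat) : Int) + 1) ((l.length : Int) + 1) 1).foldl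
          (pvStepA l) (acc, [])).1
        = acc ++ pvChunks (l.drop (3 * k)) := by
  induction m with
  | zero =>
    intro k acc h1 h2
    rw [pvFoldA_fst l _ ?_ acc []]
    · rw [pvChunks_short (by simp; omega), List.append_nil]
    · intro i hi
      rw [PySem.List.mem_pyRange_one] at hi
      rw [PySem.Int.mod_eq_emod_of_pos (by norm_num)]
      omega
  | succ m ih =>
    intro k acc h1 h2
    -- the next three characters
    have hr : (l.drop (3 * k)).length ≥ 3 := by simp; omega
    rcases hrr : l.drop (3 * k) with _ | ⟨a, _ | ⟨b, _ | ⟨c, t⟩⟩⟩ <;>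
      rw [hrr] at hr <;> simp at hr
    have hga : l[3 * k]? = some a := by
      have := @List.getElem?_drop _ l (3 * k) 0
      rw [hrr] at this; simpa using this.symm
    have hgb : l[3 * k + 1]? = some b := by
      have := @List.getElem?_drop _ l (3 * k) 1
      rw [hrr] at this; simpa using this.symm
    have hgc : l[3 * k + 2]? = some c := by
      have := @List.getElem?_drop _ l (3 * k) 2
      rw [hrr] at this; simpa using this.symm
    have ht : l.drop (3 * (k + 1)) = t := by
      have : l.drop (3 * (k + 1)) = (l.drop (3 * k)).drop 3 := by
        rw [List.drop_drop]; ring_nf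
      rw [this, hrr]; rfl
    -- unfold three iterations
    rw [PySem.List.pyRange_one_cons (by push_cast; omega),
        PySem.List.pyRange_one_cons (by push_cast; omega),
        PySem.List.pyRange_one_cons (by push_cast; omega),
        List.foldl_cons, List.foldl_cons, List.foldl_cons]
    have hm1 : PySem.Int.mod (((3 * k : Nat) : Int) + 1) 3 ≠ 0 := by
      rw [PySem.Int.mod_eq_emod_of_pos (by norm_num)]; omega
    have hm2 : PySem.Int.mod (((3 * k : Nat) : Int) + 1 + 1) 3 ≠ 0 := by
      rw [PySem.Int.mod_eq_emod_of_pos (by norm_num)]; omega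
    have hm3 : PySem.Int.mod (((3 * k : Nat) : Int) + 1 + 1 + 1) 3 = 0 := by
      rw [PySem.Int.mod_eq_emod_of_pos (by norm_num)]; omega
    have i1 : ((3 * k : Nat) : Int) + 1 - 1 = ((3 * k : Nat) : Int) := by ring
    have i2 : ((3 * k : Nat) : Int) + 1 + 1 - 1 = ((3 * k + 1 : Nat) : Int) := by push_cast; ring
    have i3 : ((3 * k : Nat) : Int) + 1 + 1 + 1 - 1 = ((3 * k + 2 : Nat) : Int) := by push_cast; ring
    rw [pvStepA_mod_ne _ _ _ hm1, i1]
    simp only [PySem.List.pyGet?_natCast, hga, Option.elim_some, List.nil_append]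
    rw [pvStepA_mod_ne _ _ _ hm2, i2]
    simp only [PySem.List.pyGet?_natCast, hgb, Option.elim_some]
    simp only [pvStepA, if_pos hm3, i3, PySem.List.pyGet?_natCast, hgc, Option.elim_some]
    have i4 : ((3 * k : Nat) : Int) + 1 + 1 + 1 + 1 = ((3 * (k + 1) : Nat) : Int) + 1 := by
      push_cast; ring
    rw [i4, ih (k + 1) _ (by omega) (by omega), ht]
    simp [pvChunks]


-- B's map over range(3*k, 3*k+3*m, 3) produces pvChunks (l.drop (3*k)).
theorem pvLoopB (l : List Char) (m : Nat) :
    ∀ (k : Nat),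
      3 * k + 3 * m ≤ l.length → l.length - 3 * k - 3 * m < 3 →
      (PySem.List.pyRange ((3 * k : Nat) : Int) (((3 * k : Nat) : Int) + 3 * (m : Int)) 3).map
          (fun i => pvChr ((PySem.Int.ofChars? (PySem.List.slice l (some i) (some (i + 3)))).getD 0))
        = pvChunks (l.drop (3 * k)) := by
  induction m with
  | zero =>
    intro k h1 h2
    rw [PySem.List.pyRange_of_pos _ _ (by norm_num), if_neg (by simp)]
    rw [List.range_zero, List.map_nil, List.map_nil]
    exact (pvChunks_short (by simp; omega)).symm
  | succ m ih =>
    intro k h1 h2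
    have hrr' : (l.drop (3 * k)).length ≥ 3 := by simp; omega
    rcases hrr : l.drop (3 * k) with _ | ⟨a, _ | ⟨b, _ | ⟨c, t⟩⟩⟩ <;>
      rw [hrr] at hrr' <;> simp at hrr'
    have ht : l.drop (3 * (k + 1)) = t := by
      have hd : l.drop (3 * (k + 1)) = (l.drop (3 * k)).drop 3 := by
        rw [List.drop_drop]; ring_nf
      rw [hd, hrr]; rfl
    have hsl : PySem.List.slice l (some ((3 * k : Nat) : Int)) (some (((3 * k : Nat) : Int) + 3))
        = [a, b, c] := by
      have h3 : ((3 * k : Nat) : Int) + 3 = ((3 * k + 3 : Nat) : Int) := by push_cast; ring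
      rw [h3, PySem.List.slice_natCast, hrr]
      have h4 : 3 * k + 3 - 3 * k = 3 := by omega
      rw [h4]
      rfl
    rw [pvRange3_cons _ _ (by push_cast; omega)]
    simp only [List.map_cons, hsl]
    have j1 : ((3 * k : Nat) : Int) + 3 = ((3 * (k + 1) : Nat) : Int) := by push_cast; ring
    have j2 : ((3 * k : Nat) : Int) + 3 * ((m + 1 : Nat) : Int)
        = ((3 * (k + 1) : Nat) : Int) + 3 * ((m : Nat) : Int) := by push_cast; ring
    rw [j1, j2, ih (k + 1) (by omega) (by omega), ht]
    simp [pvChunks]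

-- ===== VERDICT (by name: the statement is the Claim_ definition above) =====
theorem from_number_spec : Claim_equal_from_number := by
  intro msg _ _
  show from_number msg = from_number_alt msg
  have hA := pvLoopA msg.toList (msg.toList.length / 3) 0 [] (by omega) (by omega)
  have hB := pvLoopB msg.toList (msg.toList.length / 3) 0 (by omega) (by omega)
  simp only [Nat.mul_zero, Nat.cast_zero, zero_add, List.drop_zero, List.nil_append] at hA hB
  have ea : from_number msg
      = ((PySem.List.pyRange 1 ((msg.toList.length : Int) + 1) 1).foldl
          (pvStepA msg.toList) ([], [])).1 := rfl
  have eb : from_number_alt msg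
      = (PySem.List.pyRange 0 (PySem.Int.floordiv (msg.toList.length : Int) 3 * 3) 3).map
          (fun i => pvChr ((PySem.Int.ofChars?
            (PySem.List.slice msg.toList (some i) (some (i + 3)))).getD 0)) := rfl
  have hf : PySem.Int.floordiv (msg.toList.length : Int) 3 * 3
      = 3 * ((msg.toList.length / 3 : Nat) : Int) := by
    rw [PySem.Int.floordiv_eq_ediv_of_pos (by norm_num)]
    omega
  rw [ea, eb, hf, hA, ← hB]
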